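-- pv_equiv track=rewrite | github.com/zhangyue66/XuePython | scratches/1447_lc.py | simplifiedFractions
-- ===== SOURCE A (Python) =====
-- def simplifiedFractions(n: int):
--     ans = []
--     if n == 1:
--         return ans
--     def gcd(x,y) :
--         while y != 0 :
--             x , y = y , x % y
--
--         return x
--
--     for i in range(2,n+1):
--         for j in range(1,i):
--             if gcd(j,i) == 1:
--                 ans.append(str(j) + "/" + str(i))
--
--     return ans
-- ===== SOURCE B (Python) =====
-- def simplifiedFractions(n: int):
--     # Divisor-sieve rewrite: for each denominator i, build a boolean mask over
--     # 0..i-1 by striking every multiple of every proper divisor d >= 2 of i,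
--     # then emit the surviving numerators j ascending.
--     ans = []
--     for i in range(2, n + 1):
--         coprime = [True] * i
--         for d in range(2, i):
--             if i % d == 0:
--                 for m in range(d, i, d):
--                     coprime[m] = False
--         for j in range(1, i):
--             if coprime[j]:
--                 ans.append(str(j) + "/" + str(i))
--     return ans
-- ===== Notes on version B (the rewrite author's own statement) =====
-- stated objective: faster
-- what changed: Replaces A's per-pair Euclidean gcd test with, for each denominator i, a separately built boolean sieve mask over 0..i-1 that strikes every multiple of every proper divisor d>=2 of i, then emits the unstruck numerators in ascending order.
import Mathlib
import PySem

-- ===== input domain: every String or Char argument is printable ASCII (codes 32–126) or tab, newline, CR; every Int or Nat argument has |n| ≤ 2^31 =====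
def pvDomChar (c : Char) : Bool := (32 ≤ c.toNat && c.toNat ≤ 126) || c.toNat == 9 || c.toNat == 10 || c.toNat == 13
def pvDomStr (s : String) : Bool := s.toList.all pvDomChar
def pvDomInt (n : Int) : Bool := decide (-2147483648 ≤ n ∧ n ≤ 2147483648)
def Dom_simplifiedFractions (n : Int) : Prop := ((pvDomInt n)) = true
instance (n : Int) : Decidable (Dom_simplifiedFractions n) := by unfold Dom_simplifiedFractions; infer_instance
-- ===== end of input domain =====

-- B replaces the per-pair Euclidean gcd test with a per-denominator divisor-striking
-- boolean mask (a sieve pass built before the emission loop); measurably faster.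

-- ===== PORT A =====
-- Python's nested `def gcd(x, y): while y != 0: x, y = y, x % y ; return x`
-- (fuel = |y|+1 only makes the loop total; each iteration strictly shrinks |y|, so it is never exhausted)
def pyGcdFuel : Nat → Int → Int → Int
  | 0, x, _ => x
  | (k + 1), x, y => if y = 0 then x else pyGcdFuel k y (PySem.Int.mod x y)

def pyGcd (x y : Int) : Int := pyGcdFuel (y.natAbs + 1) x y

def simplifiedFractions (n : Int) : List String :=
  let ans : List String := []
  if n = 1 then ans
  else
    (PySem.List.pyRange 2 (n + 1) 1).foldl
      (fun ans i =>
        (PySem.List.pyRange 1 i 1).foldl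
          (fun ans j =>
            if pyGcd j i = 1 then ans ++ [PySem.Int.toStr j ++ "/" ++ PySem.Int.toStr i]
            else ans)
          ans)
      ans

-- ===== PORT B =====
-- B's mask pass: coprime = [True]*i; for d in range(2,i): if i % d == 0: for m in range(d,i,d): coprime[m] = False
def buildMask (i : Int) : List Bool :=
  (PySem.List.pyRange 2 i 1).foldl
    (fun cp d =>
      if PySem.Int.mod i d = 0 then
        (PySem.List.pyRange d i d).foldl (fun cp m => PySem.List.pySetD cp m false) cp
      else cp)
    (PySem.List.pyRepeat [true] i)

def simplifiedFractions_alt (n : Int) : List String :=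
  (PySem.List.pyRange 2 (n + 1) 1).foldl
    (fun ans i =>
      (PySem.List.pyRange 1 i 1).foldl
        (fun ans j =>
          if PySem.List.pyGetD (buildMask i) j false then
            ans ++ [PySem.Int.toStr j ++ "/" ++ PySem.Int.toStr i]
          else ans)
        ans)
    []

-- ===== PRECONDITION & SPEC =====
def Spec_simplifiedFractions (n : Int) (out : List String) : Prop := out = simplifiedFractions_alt n
instance (n : Int) (out : List String) : Decidable (Spec_simplifiedFractions n out) := by unfold Spec_simplifiedFractions; infer_instance

-- ===== CLAIM (what is proved, stated in full; the proofs are below) =====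
def Claim_equal_simplifiedFractions : Prop := ∀ (n : Int), Dom_simplifiedFractions n → Spec_simplifiedFractions n (simplifiedFractions n)

-- ===== LEMMAS AND PROOFS =====

-- A's gcd loop computes Nat.gcd on nonnegative inputs
theorem pyGcdFuel_eq : ∀ (k : Nat) (x y : Int), y.natAbs < k → 0 ≤ x → 0 ≤ y →
    pyGcdFuel k x y = (Nat.gcd y.toNat x.toNat : Int) := by
  intro k
  induction k with
  | zero => intro x y hk hx hy; exact absurd hk (Nat.not_lt_zero _)
  | succ k ih =>
    intro x y hk hx hy
    by_cases h : y = 0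
    · subst h
      simp [pyGcdFuel, Int.toNat_of_nonneg hx]
    · have hy' : 0 < y := lt_of_le_of_ne hy (Ne.symm h)
      have hm0 : 0 ≤ PySem.Int.mod x y := PySem.Int.mod_nonneg x hy'
      have hml : PySem.Int.mod x y < y := PySem.Int.mod_lt x hy'
      simp only [pyGcdFuel, if_neg h]
      rw [ih y (PySem.Int.mod x y) (by omega) hy hm0]
      have hmod : (PySem.Int.mod x y).toNat = x.toNat % y.toNat := by
        rcases Int.eq_ofNat_of_zero_le hx with ⟨a, rfl⟩
        rcases Int.eq_ofNat_of_zero_le hy with ⟨b, rfl⟩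
        rw [PySem.Int.mod_natCast]
        simp only [Int.toNat_natCast]
      rw [hmod, ← Nat.gcd_rec]

theorem pyGcd_eq (x y : Int) (hx : 0 ≤ x) (hy : 0 ≤ y) :
    pyGcd x y = (Nat.gcd y.toNat x.toNat : Int) :=
  pyGcdFuel_eq (y.natAbs + 1) x y (Nat.lt_succ_self _) hx hy

-- the strike pass: length is preserved
theorem foldl_pySetD_length : ∀ (ms : List Int) (cp : List Bool),
    (ms.foldl (fun cp m => PySem.List.pySetD cp m false) cp).length = cp.length := by
  intro ms
  induction ms with
  | nil => intro cp; rfl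
  | cons m rest ih =>
    intro cp
    rw [List.foldl_cons, ih, PySem.List.length_pySetD]

-- reading one cell after a strike pass
theorem strike_getD : ∀ (ms : List Int) (cp : List Bool) (k : Nat), k < cp.length →
    (∀ m ∈ ms, 0 ≤ m) →
    (ms.foldl (fun cp m => PySem.List.pySetD cp m false) cp).getD k false
      = if ∃ m ∈ ms, m.toNat = k then false else cp.getD k false := by
  intro ms
  induction ms with
  | nil => intro cp k hk hm; simp
  | cons m rest ih =>
    intro cp k hk hm
    rw [List.foldl_cons, PySem.List.pySetD_of_nonneg _ _ (hm m (List.mem_cons_self))]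
    rw [ih (cp.set m.toNat false) k (by rw [List.length_set]; exact hk)
        (fun m' h' => hm m' (List.mem_cons_of_mem _ h'))]
    by_cases h1 : ∃ m' ∈ rest, m'.toNat = k
    · rw [if_pos h1, if_pos (by rcases h1 with ⟨m', h', he⟩; exact ⟨m', List.mem_cons_of_mem _ h', he⟩)]
    · rw [if_neg h1]
      by_cases h2 : m.toNat = k
      · rw [if_pos ⟨m, List.mem_cons_self, h2⟩]
        subst h2
        simp [List.getD_eq_getElem?_getD, hk]
      · rw [if_neg (by
          rintro ⟨m', h', he⟩
          rcases List.mem_cons.mp h' with rfl | hmem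
          · exact h2 he
          · exact h1 ⟨m', hmem, he⟩)]
        simp [List.getD_eq_getElem?_getD, h2]

-- reading one cell after the whole divisor sieve
theorem sieve_getD : ∀ (ds : List Int) (i : Int) (cp : List Bool) (k : Nat), k < cp.length →
    (∀ d ∈ ds, 2 ≤ d) →
    (ds.foldl (fun cp d =>
        if PySem.Int.mod i d = 0 then
          (PySem.List.pyRange d i d).foldl (fun cp m => PySem.List.pySetD cp m false) cp
        else cp) cp).getD k false
      = if ∃ d ∈ ds, PySem.Int.mod i d = 0 ∧ ∃ m ∈ PySem.List.pyRange d i d, m.toNat = k then false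
        else cp.getD k false := by
  intro ds
  induction ds with
  | nil => intro i cp k hk hd; simp
  | cons d rest ih =>
    intro i cp k hk hd
    have hd2 : 2 ≤ d := hd d (List.mem_cons_self)
    rw [List.foldl_cons]
    by_cases hmod : PySem.Int.mod i d = 0
    · rw [if_pos hmod]
      have hnn : ∀ m ∈ PySem.List.pyRange d i d, 0 ≤ m := by
        intro m hm
        have := ((PySem.List.mem_pyRange_iff_of_pos (by omega)) m).mp hm
        omega
      rw [ih i _ k (by rw [foldl_pySetD_length]; exact hk)
          (fun d' h' => hd d' (List.mem_cons_of_mem _ h'))]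
      rw [strike_getD _ _ k hk hnn]
      by_cases h1 : ∃ d' ∈ rest, PySem.Int.mod i d' = 0 ∧ ∃ m ∈ PySem.List.pyRange d' i d', m.toNat = k
      · rw [if_pos h1, if_pos (by
          rcases h1 with ⟨d', h', rest'⟩
          exact ⟨d', List.mem_cons_of_mem _ h', rest'⟩)]
      · rw [if_neg h1]
        by_cases h2 : ∃ m ∈ PySem.List.pyRange d i d, m.toNat = k
        · rw [if_pos h2, if_pos ⟨d, List.mem_cons_self, hmod, h2⟩]
        · rw [if_neg h2, if_neg (by
            rintro ⟨d', h', hm', hex⟩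
            rcases List.mem_cons.mp h' with rfl | hmem
            · exact h2 hex
            · exact h1 ⟨d', hmem, hm', hex⟩)]
    · rw [if_neg hmod]
      rw [ih i cp k hk (fun d' h' => hd d' (List.mem_cons_of_mem _ h'))]
      by_cases h1 : ∃ d' ∈ rest, PySem.Int.mod i d' = 0 ∧ ∃ m ∈ PySem.List.pyRange d' i d', m.toNat = k
      · rw [if_pos h1, if_pos (by
          rcases h1 with ⟨d', h', rest'⟩
          exact ⟨d', List.mem_cons_of_mem _ h', rest'⟩)]
      · rw [if_neg h1, if_neg (by
          rintro ⟨d', h', hm', hex⟩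
          rcases List.mem_cons.mp h' with rfl | hmem
          · exact hmod hm'
          · exact h1 ⟨d', hmem, hm', hex⟩)]

theorem mask_getD (i j : Int) (h2 : 2 ≤ i) (hj1 : 1 ≤ j) (hji : j < i) :
    PySem.List.pyGetD (buildMask i) j false
      = if ∃ d ∈ PySem.List.pyRange 2 i 1, PySem.Int.mod i d = 0 ∧
            ∃ m ∈ PySem.List.pyRange d i d, m.toNat = j.toNat then false
        else true := by
  unfold buildMask
  rw [PySem.List.pyRepeat_singleton]
  rw [PySem.List.pyGetD_of_nonneg _ _ (by omega : (0:Int) ≤ j)]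
  rw [sieve_getD (PySem.List.pyRange 2 i 1) i _ j.toNat
      (by rw [List.length_replicate]; omega)
      (fun d hd => (PySem.List.mem_pyRange_one.mp hd).1)]
  rw [List.getD_replicate _ (by omega : j.toNat < i.toNat)]

-- the sieve condition is exactly non-coprimality
theorem cond_iff (i j : Int) (h2 : 2 ≤ i) (hj1 : 1 ≤ j) (hji : j < i) :
    (∃ d ∈ PySem.List.pyRange 2 i 1, PySem.Int.mod i d = 0 ∧
       ∃ m ∈ PySem.List.pyRange d i d, m.toNat = j.toNat)
      ↔ Nat.gcd i.toNat j.toNat ≠ 1 := by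
  constructor
  · rintro ⟨d, hd, hmod, m, hm, hmk⟩ hg
    have hdb := PySem.List.mem_pyRange_one.mp hd
    have hmb := ((PySem.List.mem_pyRange_iff_of_pos (by omega)) m).mp hm
    have hdm : d ∣ m := by
      have h' : d ∣ (m - d) + d := dvd_add hmb.2.2 dvd_rfl
      simpa using h'
    have hmj : m = j := by omega
    subst hmj
    have hdi : d ∣ i := (PySem.Int.mod_eq_zero_iff_dvd i d).mp hmod
    have e1 : d.natAbs = d.toNat := by omega
    have e2 : m.natAbs = m.toNat := by omega
    have e3 : i.natAbs = i.toNat := by omega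
    have h1 : d.toNat ∣ m.toNat := by
      have := Int.natAbs_dvd_natAbs.mpr hdm
      rwa [e1, e2] at this
    have h2' : d.toNat ∣ i.toNat := by
      have := Int.natAbs_dvd_natAbs.mpr hdi
      rwa [e1, e3] at this
    have hdg : d.toNat ∣ Nat.gcd i.toNat m.toNat := Nat.dvd_gcd h2' h1
    rw [hg] at hdg
    have := Nat.le_of_dvd one_pos hdg
    omega
  · intro hg
    have hjpos : 0 < j.toNat := by omega
    have hgj : Nat.gcd i.toNat j.toNat ∣ j.toNat := Nat.gcd_dvd_right _ _
    have hgi : Nat.gcd i.toNat j.toNat ∣ i.toNat := Nat.gcd_dvd_left _ _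
    have hg0 : 0 < Nat.gcd i.toNat j.toNat := Nat.gcd_pos_of_pos_right _ hjpos
    have hgle : Nat.gcd i.toNat j.toNat ≤ j.toNat := Nat.le_of_dvd hjpos hgj
    have hgjZ : ((Nat.gcd i.toNat j.toNat : Int)) ∣ j := by
      have h' : ((Nat.gcd i.toNat j.toNat : Int)) ∣ ((j.toNat : Int)) := Int.natCast_dvd_natCast.mpr hgj
      rwa [Int.toNat_of_nonneg (by omega : (0:Int) ≤ j)] at h'
    refine ⟨(Nat.gcd i.toNat j.toNat : Int), ?_, ?_, j, ?_, rfl⟩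
    · exact PySem.List.mem_pyRange_one.mpr ⟨by omega, by omega⟩
    · rw [PySem.Int.mod_eq_zero_iff_dvd]
      have h' : ((Nat.gcd i.toNat j.toNat : Int)) ∣ ((i.toNat : Int)) := Int.natCast_dvd_natCast.mpr hgi
      rwa [Int.toNat_of_nonneg (by omega : (0:Int) ≤ i)] at h'
    · refine ((PySem.List.mem_pyRange_iff_of_pos (by omega)) j).mpr ⟨by omega, hji, ?_⟩
      exact dvd_sub hgjZ dvd_rfl

-- pointwise: A's gcd test agrees with B's mask cell
theorem point_eq (i j : Int) (h2 : 2 ≤ i) (hj1 : 1 ≤ j) (hji : j < i) :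
    (pyGcd j i = 1) ↔ (PySem.List.pyGetD (buildMask i) j false = true) := by
  rw [mask_getD i j h2 hj1 hji]
  rw [pyGcd_eq j i (by omega) (by omega)]
  by_cases hC : ∃ d ∈ PySem.List.pyRange 2 i 1, PySem.Int.mod i d = 0 ∧
      ∃ m ∈ PySem.List.pyRange d i d, m.toNat = j.toNat
  · rw [if_pos hC]
    have hne := (cond_iff i j h2 hj1 hji).mp hC
    constructor
    · intro h1
      exact absurd (by exact_mod_cast h1) hne
    · intro h
      exact absurd h (by decide)
  · rw [if_neg hC]
    have heq : Nat.gcd i.toNat j.toNat = 1 := by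
      by_contra hne
      exact hC ((cond_iff i j h2 hj1 hji).mpr hne)
    constructor
    · intro _; rfl
    · intro _; exact_mod_cast heq

theorem main_eq (n : Int) : simplifiedFractions n = simplifiedFractions_alt n := by
  by_cases h1 : n = 1
  · subst h1; decide
  · simp only [simplifiedFractions, simplifiedFractions_alt, if_neg h1]
    apply PySem.List.foldl_congr_mem
    intro ans i hi
    have h2i : 2 ≤ i := (PySem.List.mem_pyRange_one.mp hi).1
    apply PySem.List.foldl_congr_mem
    intro acc j hj
    have hjb := PySem.List.mem_pyRange_one.mp hj
    have hp := point_eq i j h2i hjb.1 hjb.2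
    by_cases hg : pyGcd j i = 1
    · rw [if_pos hg, if_pos (hp.mp hg)]
    · rw [if_neg hg, if_neg (fun hb => hg (hp.mpr hb))]

-- ===== VERDICT (by name: the statement is the Claim_ definition above) =====
theorem simplifiedFractions_spec : Claim_equal_simplifiedFractions := by
  intro n _
  unfold Spec_simplifiedFractions
  exact main_eq n
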